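-- pv_equiv track=rewrite | github.com/danlleo/Hamming-Code | Hamming Code.py | addBits
-- ===== SOURCE A (Python) =====
-- def isPowerOfTwo(n):
--     if n <= 0:
--         return False
--     else:
--         return n & (n - 1) == 0
--
-- def addBits(bit):
--     bits = list(bit)
--     return_bits = []
--     i = 1
--
--     while len(bits) >= 1:
--         if isPowerOfTwo(i):
--             return_bits.append(0)
--             i += 1
--         else:
--             return_bits.append(bits.pop(0))
--             i += 1
--
--     return return_bits
-- ===== SOURCE B (Python) =====
-- def addBits(bit):
--     data = list(bit)
--     out = []
--     if data:
--         out.append(0)          # parity placeholder at position 1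
--     i = 0
--     m = 1                      # data slots between position 2**k and 2**(k+1): sizes 1, 3, 7, ...
--     while i < len(data):
--         out.append(0)          # parity placeholder at position 2**k
--         chunk = data[i:i + m]
--         out.extend(chunk)
--         i += len(chunk)
--         m = 2 * m + 1
--     return out
-- ===== Notes on version B (the rewrite author's own statement) =====
-- stated objective: faster
-- what changed: B never tests positions for being a power of two: it emits the output block-wise, appending one parity 0 and then slicing the next block (of doubling size 1, 3, 7, ...) of data bits directly out of the input, instead of A's per-position while-loop that tests isPowerOfTwo at every index and pops the front of a working list (pop(0) is linear).
import Mathlib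
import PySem

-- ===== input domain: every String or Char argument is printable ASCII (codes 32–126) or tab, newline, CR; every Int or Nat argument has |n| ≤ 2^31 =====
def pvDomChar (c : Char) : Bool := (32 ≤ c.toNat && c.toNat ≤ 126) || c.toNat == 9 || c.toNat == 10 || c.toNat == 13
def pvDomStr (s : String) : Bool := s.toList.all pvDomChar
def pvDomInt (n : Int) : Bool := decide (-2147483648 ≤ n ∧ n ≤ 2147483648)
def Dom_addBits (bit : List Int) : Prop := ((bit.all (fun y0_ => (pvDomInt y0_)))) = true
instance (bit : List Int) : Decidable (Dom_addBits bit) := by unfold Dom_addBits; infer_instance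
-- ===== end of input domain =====

-- B emits the output block-wise (one parity 0, then a slice of 1, 3, 7, ... data bits), with no
-- power-of-two test and no pop(0) of a working list (objective: faster).

-- ===== PORT A =====
def isPowerOfTwo (n : Int) : Bool := if n ≤ 0 then false else PySem.Int.band n (n - 1) == 0

-- termination helpers for A's while-loop (cited in decreasing_by); kept tactic-light on purpose
theorem pvLandConsec (k : Nat) : (2 * k + 1) &&& (2 * k) = 2 * k := by
  apply Nat.eq_of_testBit_eq
  intro i
  cases i with
  | zero =>
      rw [Nat.testBit_land, Nat.testBit_zero, Nat.mul_add_mod,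
          show decide (1 % 2 = 1) = true from rfl, Bool.true_and]
  | succ j =>
      rw [Nat.testBit_land, Nat.testBit_succ, Nat.testBit_succ,
          Nat.mul_add_div (by decide), Nat.mul_div_cancel_left k (by decide),
          Nat.div_eq_of_lt (by decide), Nat.add_zero, Bool.and_self]

theorem pvIsPow_pos {i : Int} (h : isPowerOfTwo i = true) : 0 < i := by
  unfold isPowerOfTwo at h
  by_cases hle : i ≤ 0
  · rw [if_pos hle] at h
    exact absurd h (by decide)
  · exact not_le.mp hle

theorem pvCastSub1 (m : Nat) (h : 1 ≤ m) : ((m : Int)) - 1 = ((m - 1 : Nat) : Int) := by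
  rw [Int.natCast_sub h, Int.natCast_one]

theorem pvCastAdd1 (m : Nat) : ((m : Int)) + 1 = ((m + 1 : Nat) : Int) := by
  rw [Int.natCast_add, Int.natCast_one]

theorem pvNotPowSucc {i : Int} (h : isPowerOfTwo i = true) (h3 : 3 ≤ i) :
    isPowerOfTwo (i + 1) = false := by
  obtain ⟨m, rfl⟩ : ∃ m : Nat, i = (m : Int) :=
    ⟨i.toNat, (Int.toNat_of_nonneg (le_trans (by decide) h3)).symm⟩
  have hm3 : 3 ≤ m := by
    have := Int.toNat_le_toNat h3
    rwa [Int.toNat_natCast] at this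
  have hm0 : 0 < m := Nat.lt_of_lt_of_le (by decide) hm3
  unfold isPowerOfTwo at h ⊢
  rw [if_neg (Int.not_le.mpr (Int.natCast_pos.mpr hm0))] at h
  rw [pvCastSub1 m hm0, PySem.Int.band_natCast, beq_iff_eq, Int.natCast_eq_zero] at h
  rw [pvCastAdd1 m]
  rw [if_neg (Int.not_le.mpr (Int.natCast_pos.mpr (Nat.succ_pos m)))]
  rw [pvCastSub1 (m + 1) (Nat.succ_le_succ (Nat.zero_le m)), Nat.succ_sub_one,
      PySem.Int.band_natCast]
  have hne : (m + 1) &&& m ≠ 0 := by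
    rcases Nat.even_or_odd m with ⟨k, hk⟩ | ⟨k, hk⟩
    · have hk2 : m = 2 * k := by rw [hk, Nat.two_mul]
      rw [hk2, pvLandConsec k, ← hk2]
      exact Nat.pos_iff_ne_zero.mp hm0
    · exfalso
      rw [hk, (by rw [Nat.succ_sub_one] : 2 * k + 1 - 1 = 2 * k), pvLandConsec k] at h
      have hk0 : k = 0 := (Nat.mul_eq_zero.mp h).resolve_left (by decide)
      rw [hk, hk0] at hm3
      exact absurd hm3 (by decide)
  rw [beq_eq_false_iff_ne]
  exact fun he => hne (Int.natCast_eq_zero.mp he)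

def pvBonus (i : Int) : Nat :=
  if i = 1 then 2 else if i = 2 then 1 else if isPowerOfTwo i then 1 else 0

theorem pvBonus_le (i : Int) : pvBonus i ≤ 2 := by
  unfold pvBonus
  split
  · exact Nat.le_refl 2
  · split
    · exact Nat.le_succ 1
    · split
      · exact Nat.le_succ 1
      · exact Nat.zero_le 2

theorem pvBonus_decr {i : Int} (h : isPowerOfTwo i = true) : pvBonus (i + 1) < pvBonus i := by
  by_cases h1 : i = 1
  · subst h1
    decide
  by_cases h2 : i = 2
  · subst h2
    decide
  have hi3 : 3 ≤ i := by
    have g1 : 0 + 1 ≤ i := Int.add_one_le_iff.mpr (pvIsPow_pos h)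
    rw [Int.zero_add] at g1
    have g2 : 1 + 1 ≤ i := Int.add_one_le_iff.mpr (lt_of_le_of_ne g1 (Ne.symm h1))
    rw [(by decide : (1 : Int) + 1 = 2)] at g2
    have g3 : 2 + 1 ≤ i := Int.add_one_le_iff.mpr (lt_of_le_of_ne g2 (Ne.symm h2))
    rw [(by decide : (2 : Int) + 1 = 3)] at g3
    exact g3
  have hf : isPowerOfTwo (i + 1) = false := pvNotPowSucc h hi3
  have hne1 : ¬ i + 1 = 1 := fun he => by
    have he' : i + 1 = 0 + 1 := by rw [he, Int.zero_add]
    rw [add_right_cancel he'] at hi3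
    exact absurd hi3 (by decide)
  have hne2 : ¬ i + 1 = 2 := fun he => by
    have he' : i + 1 = 1 + 1 := by rw [he]; decide
    exact h1 (add_right_cancel he')
  unfold pvBonus
  rw [if_neg hne1, if_neg hne2, hf, if_neg (by decide : ¬ false = true),
      if_neg h1, if_neg h2, if_pos h]
  exact Nat.zero_lt_one

theorem pvStep (a b c : Nat) (hb : b ≤ 2) : 3 * a + b < 3 * (a + 1) + c := by
  rw [Nat.mul_succ]
  exact Nat.lt_of_lt_of_le (Nat.add_lt_add_left (Nat.lt_succ_of_le hb) (3 * a))
    (Nat.le_add_right _ _)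

def addBitsLoop : List Int → Int → List Int
  | [], _ => []
  | b :: rest, i =>
    if isPowerOfTwo i then 0 :: addBitsLoop (b :: rest) (i + 1)
    else b :: addBitsLoop rest (i + 1)
termination_by bits i => 3 * bits.length + pvBonus i
decreasing_by
  · exact Nat.add_lt_add_left (pvBonus_decr (by assumption)) _
  · exact pvStep rest.length _ _ (pvBonus_le _)

def addBits (bit : List Int) : List Int := addBitsLoop bit 1

-- ===== PORT B =====
-- chunk data i m = data[i : i + m]  (the slice Source B takes in each round)
def pvChunk (data : List Int) (i m : Nat) : List Int :=
  PySem.List.slice data (some (i : Int)) (some ((i : Int) + (m : Int)))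

theorem pvChunk_eq (data : List Int) (i m : Nat) :
    pvChunk data i m = (data.drop i).take m := by
  unfold pvChunk
  rw [PySem.List.slice_natCast_add]

-- termination helper for the while-loop (cited in decreasing_by)
theorem pvChunk_len (data : List Int) (i m : Nat) :
    (pvChunk data i m).length = min m (data.length - i) := by
  rw [pvChunk_eq, List.length_take, List.length_drop]

theorem pvBlkDec (L i m : Nat) (hi : i < L) :
    2 * (L - (i + min m (L - i))) + (1 - (2 * m + 1)) < 2 * (L - i) + (1 - m) := by
  cases m with
  | zero =>
      rw [Nat.zero_min, Nat.add_zero, Nat.add_zero, Nat.sub_zero]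
      exact Nat.lt_succ_self _
  | succ m' =>
      have hc : 0 < min (m' + 1) (L - i) :=
        lt_min (Nat.succ_pos m') (Nat.sub_pos_of_lt hi)
      rw [Nat.sub_eq_zero_of_le
            (show (1 : Nat) ≤ 2 * (m' + 1) + 1 from Nat.succ_le_succ (Nat.zero_le _)),
          Nat.sub_eq_zero_of_le
            (show (1 : Nat) ≤ m' + 1 from Nat.succ_le_succ (Nat.zero_le _)),
          Nat.add_zero, Nat.add_zero]
      exact mul_lt_mul_of_pos_left
        (Nat.sub_lt_sub_left hi (Nat.lt_add_of_pos_right hc)) (by decide)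

def blocksB (data : List Int) (i m : Nat) : List Int :=
  if _h : i < data.length then
    0 :: (pvChunk data i m ++ blocksB data (i + (pvChunk data i m).length) (2 * m + 1))
  else []
termination_by 2 * (data.length - i) + (1 - m)
decreasing_by
  rw [pvChunk_len]
  exact pvBlkDec data.length i m _h

def addBits_alt (bit : List Int) : List Int :=
  (if bit.isEmpty then [] else [0]) ++ blocksB bit 0 1

-- ===== PRECONDITION & SPEC =====
def Spec_addBits (bit : List Int) (out : List Int) : Prop := out = addBits_alt bit
instance (bit : List Int) (out : List Int) : Decidable (Spec_addBits bit out) := by unfold Spec_addBits; infer_instance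

-- ===== CLAIM (what is proved, stated in full; the proofs are below) =====
def Claim_equal_addBits : Prop := ∀ (bit : List Int), Dom_addBits bit → Spec_addBits bit (addBits bit)

-- ===== LEMMAS AND PROOFS =====

-- a number with its k-th bit set between consecutive powers of two
theorem pvTestBit_of_between (x k : Nat) (h1 : 2 ^ k ≤ x) (h2 : x < 2 ^ (k + 1)) :
    x.testBit k = true := by
  have hd : x / 2 ^ k = 1 := by
    apply Nat.div_eq_of_lt_le (by omega)
    rw [Nat.pow_succ] at h2; omega
  simp [Nat.testBit, Nat.shiftRight_eq_div_pow, hd]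

theorem pvPow_isPow (k : Nat) : isPowerOfTwo ((2 ^ k : Nat) : Int) = true := by
  have hp : 1 ≤ 2 ^ k := Nat.one_le_two_pow
  unfold isPowerOfTwo
  have hnotle : ¬ ((2 ^ k : Nat) : Int) ≤ 0 := by exact_mod_cast by omega
  rw [if_neg hnotle]
  have e1 : ((2 ^ k : Nat) : Int) - 1 = ((2 ^ k - 1 : Nat) : Int) := by omega
  rw [e1, PySem.Int.band_natCast, beq_iff_eq]
  have : (2 ^ k) &&& (2 ^ k - 1) = 0 := by
    apply Nat.eq_of_testBit_eq
    intro i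
    rw [Nat.testBit_land, Nat.testBit_two_pow, Nat.testBit_two_pow_sub_one]
    by_cases hik : k = i <;> simp [hik]
  exact_mod_cast this

theorem pvBetween_not_isPow (k m : Nat) (h1 : 2 ^ k < m) (h2 : m < 2 ^ (k + 1)) :
    isPowerOfTwo (m : Int) = false := by
  have hm : 0 < m := by have := Nat.one_le_two_pow (n := k); omega
  unfold isPowerOfTwo
  rw [if_neg (by exact_mod_cast by omega)]
  have e1 : ((m : Nat) : Int) - 1 = ((m - 1 : Nat) : Int) := by omega
  rw [e1, PySem.Int.band_natCast]
  have hb : (m &&& (m - 1)).testBit k = true := by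
    rw [Nat.testBit_land]
    rw [pvTestBit_of_between m k (by omega) h2,
        pvTestBit_of_between (m - 1) k (by omega) (by omega)]
    rfl
  have hne : m &&& (m - 1) ≠ 0 := by
    intro h0; rw [h0] at hb; simp at hb
  rw [beq_eq_false_iff_ne]
  exact_mod_cast hne

-- A's loop over a stretch of non-power positions just copies data bits
theorem pvConsume (n : Nat) : ∀ (bits : List Int) (p : Int),
    (∀ j : Int, p ≤ j → j < p + n → isPowerOfTwo j = false) →
    addBitsLoop bits p = bits.take n ++ addBitsLoop (bits.drop n) (p + n) := by
  induction n with
  | zero => intro bits p _; simp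
  | succ n ih =>
      intro bits p hnp
      cases bits with
      | nil => simp [addBitsLoop]
      | cons b rest =>
          have hp : isPowerOfTwo p = false := hnp p le_rfl (by push_cast; omega)
          rw [addBitsLoop, if_neg (by simp [hp])]
          rw [ih rest (p + 1) (fun j hj1 hj2 => hnp j (by omega) (by push_cast at *; omega))]
          have e : p + 1 + (n : Int) = p + ((n : Nat) + 1 : Nat) := by push_cast; ring
          rw [e]
          simp

theorem pvBlocks (data : List Int) : ∀ (n i k : Nat), data.length - i ≤ n →
    blocksB data i (2 ^ (k + 1) - 1) = addBitsLoop (data.drop i) ((2 ^ (k + 1) : Nat) : Int) := by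
  intro n
  induction n with
  | zero =>
      intro i k hn
      rw [blocksB, dif_neg (by omega)]
      rw [List.drop_eq_nil_iff.mpr (by omega), addBitsLoop]
  | succ n ih =>
      intro i k hn
      by_cases h : i < data.length
      · rw [blocksB, dif_pos h]
        have hpow : 1 ≤ (2 : Nat) ^ (k + 1) := Nat.one_le_two_pow
        have hd2 : (2 : Nat) ^ (k + 1 + 1) = 2 ^ (k + 1) + 2 ^ (k + 1) := by ring
        obtain ⟨b, rest, hdrop⟩ : ∃ b rest, data.drop i = b :: rest := by
          rcases hd : data.drop i with _ | ⟨b, rest⟩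
          · exfalso; have := List.drop_eq_nil_iff.mp hd; omega
          · exact ⟨b, rest, rfl⟩
        rw [hdrop, addBitsLoop, if_pos (pvPow_isPow (k + 1)), ← hdrop]
        have hcons := pvConsume (2 ^ (k + 1) - 1) (data.drop i) (((2 ^ (k + 1) : Nat) : Int) + 1)
          (fun j hj1 hj2 => by
            obtain ⟨q, rfl⟩ : ∃ q : Nat, j = (q : Int) := ⟨j.toNat, by omega⟩
            apply pvBetween_not_isPow (k + 1) q <;> omega)
        have e2 : ((2 ^ (k + 1) : Nat) : Int) + 1 + ((2 ^ (k + 1) - 1 : Nat) : Int)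
            = ((2 ^ (k + 1 + 1) : Nat) : Int) := by omega
        rw [e2] at hcons
        rw [hcons]
        have hlen := pvChunk_len data i (2 ^ (k + 1) - 1)
        have hch := pvChunk_eq data i (2 ^ (k + 1) - 1)
        have hm : 2 * (2 ^ (k + 1) - 1) + 1 = 2 ^ (k + 1 + 1) - 1 := by omega
        have hrec := ih (i + (pvChunk data i (2 ^ (k + 1) - 1)).length) (k + 1) (by omega)
        rw [hm, hrec]
        have hdd : data.drop (i + (pvChunk data i (2 ^ (k + 1) - 1)).length)
            = (data.drop i).drop (2 ^ (k + 1) - 1) := by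
          rw [List.drop_drop]
          rcases Nat.le_total (2 ^ (k + 1) - 1) (data.length - i) with hle | hle
          · congr 1
            omega
          · rw [List.drop_eq_nil_iff.mpr (by omega), List.drop_eq_nil_iff.mpr (by omega)]
        rw [hdd, hch]
      · rw [blocksB, dif_neg h]
        rw [List.drop_eq_nil_iff.mpr (by omega), addBitsLoop]

-- ===== VERDICT (by name: the statement is the Claim_ definition above) =====
theorem addBits_spec : Claim_equal_addBits := by
  intro bit _
  unfold Spec_addBits addBits addBits_alt
  cases bit with
  | nil =>
      rw [addBitsLoop, blocksB, dif_neg (by simp)]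
      simp
  | cons b rest =>
      have h1 : isPowerOfTwo 1 = true := by decide
      rw [addBitsLoop, if_pos h1]
      have hb := pvBlocks (b :: rest) (b :: rest).length 0 0 (by omega)
      norm_num at hb
      rw [hb]
      simp
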